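-- pv_equiv track=rewrite | github.com/Mirror-fish/MEGA-xTEA | megaxtea/genotype_features.py | _is_consecutive_polyA_T
-- ===== SOURCE A (Python) =====
-- N_MIN_A_T = 5                # min consecutive A/T for polyA
--
-- def _is_consecutive_polyA_T(seq: str, min_len: int = N_MIN_A_T) -> bool:
--     """Check if sequence contains consecutive polyA or polyT."""
--     if not seq:
--         return False
--     count_a = 0
--     count_t = 0
--     max_a = 0
--     max_t = 0
--     for c in seq.upper():
--         if c == 'A':
--             count_a += 1
--             max_a = max(max_a, count_a)
--             count_t = 0
--         elif c == 'T':
--             count_t += 1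
--             max_t = max(max_t, count_t)
--             count_a = 0
--         else:
--             count_a = 0
--             count_t = 0
--     return max_a >= min_len or max_t >= min_len
-- ===== SOURCE B (Python) =====
-- N_MIN_A_T = 5                # min consecutive A/T for polyA
--
-- def _is_consecutive_polyA_T(seq: str, min_len: int = N_MIN_A_T) -> bool:
--     """Check if sequence contains consecutive polyA or polyT (run-length scan)."""
--     if not seq:
--         return False
--     s = seq.upper()
--     best = 0
--     i = 0
--     while i < len(s):
--         j = i + 1
--         while j < len(s) and s[j] == s[i]:
--             j += 1
--         if s[i] in 'AT':
--             best = max(best, j - i)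
--         i = j
--     return best >= min_len
-- ===== Notes on version B (the rewrite author's own statement) =====
-- stated objective: alternative
-- what changed: Replaces the four-counter per-character state machine (count_a/count_t/max_a/max_t) with a two-level scan that consumes maximal equal-character runs and keeps the maximum length over A/T runs.
import Mathlib
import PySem

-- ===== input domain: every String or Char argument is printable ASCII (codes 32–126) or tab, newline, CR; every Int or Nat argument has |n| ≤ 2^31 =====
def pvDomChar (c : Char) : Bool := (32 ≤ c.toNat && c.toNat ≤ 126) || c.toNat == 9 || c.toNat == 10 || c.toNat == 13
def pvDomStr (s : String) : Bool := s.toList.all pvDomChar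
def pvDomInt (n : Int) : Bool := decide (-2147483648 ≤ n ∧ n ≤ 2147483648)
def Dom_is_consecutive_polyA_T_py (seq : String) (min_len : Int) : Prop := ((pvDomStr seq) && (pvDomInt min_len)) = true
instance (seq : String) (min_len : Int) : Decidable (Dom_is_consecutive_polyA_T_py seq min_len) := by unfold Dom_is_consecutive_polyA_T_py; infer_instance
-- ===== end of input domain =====

-- B replaces A's four-counter per-character state machine by a run-at-a-time scan
-- keeping the maximum A/T run length (objective: alternative decomposition, same cost).

-- ===== PORT A =====
-- one iteration of A's for-loop over the state (count_a, count_t, max_a, max_t)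
def pvAStep (s : Int × Int × Int × Int) (c : Char) : Int × Int × Int × Int :=
  if c = 'A' then (s.1 + 1, 0, max s.2.2.1 (s.1 + 1), s.2.2.2)
  else if c = 'T' then (0, s.2.1 + 1, s.2.2.1, max s.2.2.2 (s.2.1 + 1))
  else (0, 0, s.2.2.1, s.2.2.2)

def is_consecutive_polyA_T_py (seq : String) (min_len : Int) : Bool :=
  if seq = "" then false
  else
    let f := (PySem.Str.upper seq).toList.foldl pvAStep (0, 0, 0, 0)
    decide (f.2.2.1 ≥ min_len) || decide (f.2.2.2 ≥ min_len)

-- ===== PORT B =====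
-- inner while loop of Source B: consume the run of `c` at the front, return (its extra length, rest)
def pvSplitRun (c : Char) : List Char → Nat × List Char
  | [] => (0, [])
  | d :: rest =>
      if d = c then
        let p := pvSplitRun c rest
        (p.1 + 1, p.2)
      else (0, d :: rest)

theorem pvSplitRun_len (c : Char) : ∀ l : List Char, (pvSplitRun c l).2.length ≤ l.length := by
  intro l
  induction l with
  | nil => simp [pvSplitRun]
  | cons d rest ih =>
      by_cases h : d = c <;> simp [pvSplitRun, h]
      omega

-- outer while loop of Source B: best = running max of A/T run lengths
def pvBScan (best : Int) : List Char → Int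
  | [] => best
  | c :: rest =>
      let p := pvSplitRun c rest
      pvBScan (if c = 'A' || c = 'T' then max best (1 + (p.1 : Int)) else best) p.2
termination_by l => l.length
decreasing_by
  have := pvSplitRun_len c rest
  simp only [List.length_cons]; omega

def is_consecutive_polyA_T_py_alt (seq : String) (min_len : Int) : Bool :=
  if seq = "" then false
  else decide (pvBScan 0 (PySem.Str.upper seq).toList ≥ min_len)

-- ===== PRECONDITION & SPEC =====
def Spec_is_consecutive_polyA_T_py (seq : String) (min_len : Int) (out : Bool) : Prop := out = is_consecutive_polyA_T_py_alt seq min_len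
instance (seq : String) (min_len : Int) (out : Bool) : Decidable (Spec_is_consecutive_polyA_T_py seq min_len out) := by unfold Spec_is_consecutive_polyA_T_py; infer_instance

-- ===== CLAIM (what is proved, stated in full; the proofs are below) =====
def Claim_equal_is_consecutive_polyA_T_py : Prop := ∀ (seq : String) (min_len : Int), Dom_is_consecutive_polyA_T_py seq min_len → Spec_is_consecutive_polyA_T_py seq min_len (is_consecutive_polyA_T_py seq min_len)

-- ===== LEMMAS AND PROOFS =====

theorem pvSplitRun_append (c : Char) : ∀ l : List Char,
    l = List.replicate (pvSplitRun c l).1 c ++ (pvSplitRun c l).2 := by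
  intro l
  induction l with
  | nil => simp [pvSplitRun]
  | cons d rest ih =>
      by_cases h : d = c
      · subst h; simp [pvSplitRun, List.replicate_succ]; exact ih
      · simp [pvSplitRun, h]

theorem pvSplitRun_head (c : Char) : ∀ l : List Char, ∀ d,
    (pvSplitRun c l).2.head? = some d → d ≠ c := by
  intro l
  induction l with
  | nil => simp [pvSplitRun]
  | cons e rest ih =>
      intro d hd
      by_cases h : e = c
      · exact ih d (by simpa [pvSplitRun, h] using hd)
      · simp [pvSplitRun, h] at hd; subst hd; exact h

-- fold over a run of 'A's from a mid-run state
theorem pvFoldRunA (k : Nat) : ∀ (m ma mt : Int),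
    (List.replicate k 'A').foldl pvAStep (m, 0, max ma m, mt)
      = (m + k, 0, max ma (m + k), mt) := by
  induction k with
  | zero => intro m ma mt; simp
  | succ k ih =>
      intro m ma mt
      rw [List.replicate_succ, List.foldl_cons]
      have h1 : pvAStep (m, 0, max ma m, mt) 'A' = (m + 1, 0, max ma (m + 1), mt) := by
        simp only [pvAStep, reduceIte]
        rw [max_assoc, max_eq_right (by omega : m ≤ m + 1)]
      rw [h1, ih (m + 1) ma mt]
      have : m + 1 + (k : Int) = m + ((k : Nat) + 1 : Nat) := by push_cast; ring
      rw [this]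

-- fold over a run of 'T's from a mid-run state
theorem pvFoldRunT (k : Nat) : ∀ (m ma mt : Int),
    (List.replicate k 'T').foldl pvAStep (0, m, ma, max mt m)
      = (0, m + k, ma, max mt (m + k)) := by
  induction k with
  | zero => intro m ma mt; simp
  | succ k ih =>
      intro m ma mt
      rw [List.replicate_succ, List.foldl_cons]
      have h1 : pvAStep (0, m, ma, max mt m) 'T' = (0, m + 1, ma, max mt (m + 1)) := by
        simp only [pvAStep, reduceIte]
        rw [if_neg (by decide), max_assoc, max_eq_right (by omega : m ≤ m + 1)]
      rw [h1, ih (m + 1) ma mt]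
      have : m + 1 + (k : Int) = m + ((k : Nat) + 1 : Nat) := by push_cast; ring
      rw [this]

-- fold over a run of a non-A/T character leaves the zeroed state alone
theorem pvFoldRunO (k : Nat) (d : Char) (hA : d ≠ 'A') (hT : d ≠ 'T') (ma mt : Int) :
    (List.replicate k d).foldl pvAStep (0, 0, ma, mt) = (0, 0, ma, mt) := by
  induction k with
  | zero => simp
  | succ k ih =>
      rw [List.replicate_succ, List.foldl_cons]
      have h1 : pvAStep (0, 0, ma, mt) d = (0, 0, ma, mt) := by
        simp [pvAStep, hA, hT]
      rw [h1, ih]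

-- Main invariant: at any point of A's loop, the max of the two run-maxima equals
-- B's best over the already-consumed runs (= best), extended over the remaining list.
theorem pvMain : ∀ (N : Nat) (l : List Char), l.length ≤ N →
    ∀ (ca ct ma mt best : Int), 0 ≤ ca → 0 ≤ ct → ca ≤ ma → ct ≤ mt →
    best = max ma mt →
    (∀ d, l.head? = some d → (d = 'A' → ca = 0) ∧ (d = 'T' → ct = 0)) →
    (let f := l.foldl pvAStep (ca, ct, ma, mt)
     max f.2.2.1 f.2.2.2 = pvBScan best l) := by
  intro N
  induction N with
  | zero =>
      intro l hl ca ct ma mt best _ _ _ _ hbest _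
      have : l = [] := List.length_eq_zero_iff.mp (Nat.le_zero.mp hl)
      subst this
      simpa [pvBScan] using hbest.symm
  | succ N ih =>
      intro l hl ca ct ma mt best hca hct hcama hctmt hbest hhead
      cases l with
      | nil => simpa [pvBScan] using hbest.symm
      | cons d rest =>
          simp only [List.length_cons] at hl
          -- decompose rest into the run of d and the remainder
          have hdec := pvSplitRun_append d rest
          have hrl : (pvSplitRun d rest).2.length ≤ N := by
            have := pvSplitRun_len d rest; omega
          set k := (pvSplitRun d rest).1 with hk
          set r := (pvSplitRun d rest).2 with hr
          have hrhead : ∀ e, r.head? = some e → e ≠ d := fun e he => pvSplitRun_head d rest e he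
          by_cases hdA : d = 'A'
          · subst hdA
            have hca0 : ca = 0 := ((hhead 'A' rfl).1 rfl)
            subst hca0
            have hstep : pvAStep (0, ct, ma, mt) 'A' = (1, 0, max ma 1, mt) := by
              simp [pvAStep, zero_add]
            have hfold : ((('A' :: rest).foldl pvAStep (0, ct, ma, mt)))
                = r.foldl pvAStep (1 + k, 0, max ma (1 + k), mt) := by
              rw [List.foldl_cons, hstep]
              conv_lhs => rw [hdec]
              rw [List.foldl_append, pvFoldRunA k 1 ma mt]
            have hscan : pvBScan best ('A' :: rest)
                = pvBScan (max best (1 + (k : Int))) r := by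
              rw [pvBScan]; simp; rw [← hk, ← hr]
            rw [hfold, hscan]
            have := ih r hrl (1 + k) 0 (max ma (1 + k)) mt (max best (1 + (k : Int)))
              (by positivity) le_rfl (le_max_right _ _) (le_trans hct hctmt)
              (by rw [hbest, max_right_comm])
              (fun e he => ⟨fun hEA => absurd hEA (by simpa [hEA] using hrhead e he), fun _ => rfl⟩)
            exact this
          · by_cases hdT : d = 'T'
            · subst hdT
              have hct0 : ct = 0 := ((hhead 'T' rfl).2 rfl)
              subst hct0
              have hstep : pvAStep (ca, 0, ma, mt) 'T' = (0, 1, ma, max mt 1) := by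
                simp [pvAStep, zero_add]
              have hfold : ((('T' :: rest).foldl pvAStep (ca, 0, ma, mt)))
                  = r.foldl pvAStep (0, 1 + k, ma, max mt (1 + k)) := by
                rw [List.foldl_cons, hstep]
                conv_lhs => rw [hdec]
                rw [List.foldl_append, pvFoldRunT k 1 ma mt]
              have hscan : pvBScan best ('T' :: rest)
                  = pvBScan (max best (1 + (k : Int))) r := by
                rw [pvBScan]; simp; rw [← hk, ← hr]
              rw [hfold, hscan]
              have := ih r hrl 0 (1 + k) ma (max mt (1 + k)) (max best (1 + (k : Int)))
                le_rfl (by positivity) (le_trans hca hcama) (le_max_right _ _)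
                (by rw [hbest, max_assoc])
                (fun e he => ⟨fun _ => rfl, fun hET => absurd hET (by simpa [hET] using hrhead e he)⟩)
              exact this
            · have hstep : pvAStep (ca, ct, ma, mt) d = (0, 0, ma, mt) := by
                simp [pvAStep, hdA, hdT]
              have hfold : (((d :: rest).foldl pvAStep (ca, ct, ma, mt)))
                  = r.foldl pvAStep (0, 0, ma, mt) := by
                rw [List.foldl_cons, hstep]
                conv_lhs => rw [hdec]
                rw [List.foldl_append, pvFoldRunO k d hdA hdT ma mt]
              have hscan : pvBScan best (d :: rest) = pvBScan best r := by
                rw [pvBScan]; simp [hdA, hdT]; rw [← hr]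
              rw [hfold, hscan]
              exact ih r hrl 0 0 ma mt best le_rfl le_rfl
                (le_trans hca hcama) (le_trans hct hctmt) hbest
                (fun e _ => ⟨fun _ => rfl, fun _ => rfl⟩)

theorem pvDecideMax (m a b : Int) : (decide (a ≥ m) || decide (b ≥ m)) = decide (max a b ≥ m) := by
  by_cases h1 : m ≤ a <;> by_cases h2 : m ≤ b <;> simp [ge_iff_le, h1, h2]

-- ===== VERDICT (by name: the statement is the Claim_ definition above) =====
theorem is_consecutive_polyA_T_py_spec : Claim_equal_is_consecutive_polyA_T_py := by
  intro seq min_len _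
  unfold Spec_is_consecutive_polyA_T_py is_consecutive_polyA_T_py is_consecutive_polyA_T_py_alt
  by_cases h : seq = ""
  · simp [h]
  · rw [if_neg h, if_neg h]
    have hmain := pvMain (PySem.Str.upper seq).toList.length (PySem.Str.upper seq).toList
      le_rfl 0 0 0 0 0 le_rfl le_rfl le_rfl le_rfl (by simp)
      (fun d _ => ⟨fun _ => rfl, fun _ => rfl⟩)
    simp only [] at hmain
    rw [← hmain]
    exact pvDecideMax min_len _ _
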